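-- pv_equiv track=rewrite | github.com/bneb/advent-of-code-2020 | day17/day17.py | get_search_bounds4
-- ===== SOURCE A (Python) =====
-- def get_search_bounds4(grid):
--     '''Returns min x - 1, max x + 1, min y - 1, max y + 1, min z - 1, max z + 1
--     '''
--     minx = 1
--     maxx = -1
--     miny = 1
--     maxy = -1
--     minz = 1
--     maxz = -1
--     minw = 1
--     maxw = -1
--
--     for x, y, z, w in grid:
--         minx = min(x, minx)
--         maxx = max(x, maxx)
--         miny = min(y, miny)
--         maxy = max(y, maxy)
--         minz = min(z, minz)
--         maxz = max(z, maxz)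
--         minw = min(w, minw)
--         maxw = max(w, maxw)
--
--     return minx-1, maxx+1, miny-1, maxy+1, minz-1, maxz+1, minw-1, maxw+1
-- ===== SOURCE B (Python) =====
-- def get_search_bounds4(grid):
--     '''Returns min x - 1, max x + 1, min y - 1, max y + 1, min z - 1, max z + 1
--     '''
--     pts = list(grid)
--     bounds = []
--     for dim in range(4):
--         coords = [p[dim] for p in pts]
--         lo = sorted([1] + coords)[0]
--         hi = sorted([-1] + coords, reverse=True)[0]
--         bounds.append(lo - 1)
--         bounds.append(hi + 1)
--     return tuple(bounds)
-- ===== Notes on version B (the rewrite author's own statement) =====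
-- stated objective: alternative
-- what changed: Replaces the single loop threading eight min/max accumulators with a sort-then-pick-endpoint strategy: for each dimension the seed (1 or -1) is prepended to the coordinate list, the list is sorted (ascending for the lower bound, descending for the upper), and the first element of each sorted list is taken.
import Mathlib
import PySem

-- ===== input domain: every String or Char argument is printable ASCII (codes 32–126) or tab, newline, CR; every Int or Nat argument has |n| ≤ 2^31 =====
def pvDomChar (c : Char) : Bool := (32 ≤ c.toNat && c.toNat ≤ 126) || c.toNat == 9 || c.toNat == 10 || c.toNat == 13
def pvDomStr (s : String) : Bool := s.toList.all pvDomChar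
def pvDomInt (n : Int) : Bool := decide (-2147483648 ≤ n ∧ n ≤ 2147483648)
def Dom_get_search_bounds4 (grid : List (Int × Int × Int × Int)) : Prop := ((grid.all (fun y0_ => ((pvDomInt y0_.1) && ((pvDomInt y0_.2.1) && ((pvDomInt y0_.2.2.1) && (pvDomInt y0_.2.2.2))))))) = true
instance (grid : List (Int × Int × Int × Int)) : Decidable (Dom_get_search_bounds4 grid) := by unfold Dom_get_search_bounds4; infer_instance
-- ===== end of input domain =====

-- B replaces A's single eight-accumulator loop with a sort-then-pick-endpoint strategy per dimension (objective: alternative).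


-- ===== PORT A =====
def get_search_bounds4 (grid : List (Int × Int × Int × Int)) : Int × Int × Int × Int × Int × Int × Int × Int :=
  let r := grid.foldl
    (fun (acc : Int × Int × Int × Int × Int × Int × Int × Int) p =>
      (min p.1 acc.1, max p.1 acc.2.1,
       min p.2.1 acc.2.2.1, max p.2.1 acc.2.2.2.1,
       min p.2.2.1 acc.2.2.2.2.1, max p.2.2.1 acc.2.2.2.2.2.1,
       min p.2.2.2 acc.2.2.2.2.2.2.1, max p.2.2.2 acc.2.2.2.2.2.2.2))
    (1, -1, 1, -1, 1, -1, 1, -1)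
  (r.1 - 1, r.2.1 + 1, r.2.2.1 - 1, r.2.2.2.1 + 1,
   r.2.2.2.2.1 - 1, r.2.2.2.2.2.1 + 1, r.2.2.2.2.2.2.1 - 1, r.2.2.2.2.2.2.2 + 1)

-- ===== PORT B =====
-- one iteration of Source B's per-dimension loop: sorted([1]+coords)[0]-1 and sorted([-1]+coords, reverse=True)[0]+1
-- (both sorted lists are nonempty by construction, so cand[0] is ported as .headI — exact there)
def pvDimBounds (coords : List Int) : Int × Int :=
  ((PySem.List.sorted (1 :: coords) (fun x => x) false).headI - 1,
   (PySem.List.sorted (-1 :: coords) (fun x => x) true).headI + 1)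

def get_search_bounds4_alt (grid : List (Int × Int × Int × Int)) : Int × Int × Int × Int × Int × Int × Int × Int :=
  let pts := grid
  let bx := pvDimBounds (pts.map (fun p => p.1))
  let by' := pvDimBounds (pts.map (fun p => p.2.1))
  let bz := pvDimBounds (pts.map (fun p => p.2.2.1))
  let bw := pvDimBounds (pts.map (fun p => p.2.2.2))
  (bx.1, bx.2, by'.1, by'.2, bz.1, bz.2, bw.1, bw.2)

-- ===== PRECONDITION & SPEC =====
def Spec_get_search_bounds4 (grid : List (Int × Int × Int × Int)) (out : Int × Int × Int × Int × Int × Int × Int × Int) : Prop := out = get_search_bounds4_alt grid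
instance (grid : List (Int × Int × Int × Int)) (out : Int × Int × Int × Int × Int × Int × Int × Int) : Decidable (Spec_get_search_bounds4 grid out) := by
  unfold Spec_get_search_bounds4
  exact @instDecidableEqProd _ _ _ (@instDecidableEqProd _ _ _ (@instDecidableEqProd _ _ _ (@instDecidableEqProd _ _ _ (@instDecidableEqProd _ _ _ (@instDecidableEqProd _ _ _ (@instDecidableEqProd _ _ _ inferInstance)))))) out (get_search_bounds4_alt grid)

-- ===== CLAIM (what is proved, stated in full; the proofs are below) =====
def Claim_equal_get_search_bounds4 : Prop := ∀ (grid : List (Int × Int × Int × Int)), Dom_get_search_bounds4 grid → Spec_get_search_bounds4 grid (get_search_bounds4 grid)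

-- ===== LEMMAS AND PROOFS =====

-- the head of the ascending sort of a::cs is the minimum of a::cs, i.e. foldl min a cs
theorem head_sorted_min (a : Int) (cs : List Int) :
    (PySem.List.sorted (a :: cs) (fun x => x) false).headI = cs.foldl min a := by
  obtain ⟨m, t, heq⟩ : ∃ m t, PySem.List.sorted (a :: cs) (fun x => x) false = m :: t := by
    have hp := PySem.List.sorted_perm (a :: cs) (fun x => x) false
    cases h : PySem.List.sorted (a :: cs) (fun x => x) false with
    | nil => have := hp.length_eq; rw [h] at this; simp at this
    | cons m t => exact ⟨m, t, rfl⟩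
  have hle := PySem.List.key_head_sorted_le (xs := a :: cs) (key := fun x => x) heq
  have hmem : m ∈ a :: cs :=
    (PySem.List.mem_sorted (x := m) (xs := a :: cs) (key := fun x => x) (rev := false)).mp
      (by rw [heq]; exact List.mem_cons_self)
  have h1 : (a :: cs).min? = some m := List.min?_eq_some_iff.mpr ⟨hmem, fun y hy => hle y hy⟩
  have h2 : (a :: cs).min? = some (cs.foldl min a) := List.min?_cons'
  rw [h1] at h2
  rw [heq]
  simpa using Option.some.inj h2

-- the head of the descending sort of a::cs is the maximum of a::cs, i.e. foldl max a cs
theorem head_sorted_max (a : Int) (cs : List Int) :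
    (PySem.List.sorted (a :: cs) (fun x => x) true).headI = cs.foldl max a := by
  obtain ⟨m, t, heq⟩ : ∃ m t, PySem.List.sorted (a :: cs) (fun x => x) true = m :: t := by
    have hp := PySem.List.sorted_perm (a :: cs) (fun x => x) true
    cases h : PySem.List.sorted (a :: cs) (fun x => x) true with
    | nil => have := hp.length_eq; rw [h] at this; simp at this
    | cons m t => exact ⟨m, t, rfl⟩
  have hge := PySem.List.key_head_sorted_rev_ge (xs := a :: cs) (key := fun x => x) heq
  have hmem : m ∈ a :: cs :=
    (PySem.List.mem_sorted (x := m) (xs := a :: cs) (key := fun x => x) (rev := true)).mp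
      (by rw [heq]; exact List.mem_cons_self)
  have h1 : (a :: cs).max? = some m := List.max?_eq_some_iff.mpr ⟨hmem, fun y hy => hge y hy⟩
  have h2 : (a :: cs).max? = some (cs.foldl max a) := List.max?_cons'
  rw [h1] at h2
  rw [heq]
  simpa using Option.some.inj h2

-- A's eight-accumulator fold splits into eight per-coordinate folds
theorem fold_transpose (grid : List (Int × Int × Int × Int))
    (a b c d e f g h : Int) :
    grid.foldl
      (fun (acc : Int × Int × Int × Int × Int × Int × Int × Int) p =>
        (min p.1 acc.1, max p.1 acc.2.1,
         min p.2.1 acc.2.2.1, max p.2.1 acc.2.2.2.1,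
         min p.2.2.1 acc.2.2.2.2.1, max p.2.2.1 acc.2.2.2.2.2.1,
         min p.2.2.2 acc.2.2.2.2.2.2.1, max p.2.2.2 acc.2.2.2.2.2.2.2))
      (a, b, c, d, e, f, g, h)
    = ((grid.map (fun p => p.1)).foldl min a,
       (grid.map (fun p => p.1)).foldl max b,
       (grid.map (fun p => p.2.1)).foldl min c,
       (grid.map (fun p => p.2.1)).foldl max d,
       (grid.map (fun p => p.2.2.1)).foldl min e,
       (grid.map (fun p => p.2.2.1)).foldl max f,
       (grid.map (fun p => p.2.2.2)).foldl min g,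
       (grid.map (fun p => p.2.2.2)).foldl max h) := by
  induction grid generalizing a b c d e f g h with
  | nil => simp [List.foldl]
  | cons p t ih =>
      simp only [List.foldl, List.map]
      rw [ih]
      simp [min_comm, max_comm]

-- ===== VERDICT (by name: the statement is the Claim_ definition above) =====
theorem get_search_bounds4_spec : Claim_equal_get_search_bounds4 := by
  intro grid _
  unfold Spec_get_search_bounds4 get_search_bounds4 get_search_bounds4_alt pvDimBounds
  simp only [fold_transpose, head_sorted_min, head_sorted_max]
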